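-- pv_equiv track=rewrite | github.com/JHEJIAZHANG/Project | classroomai/services/recommendation.py | diversify_by_source
-- ===== SOURCE A (Python) =====
-- from typing import List, Dict, Optional
--
-- def diversify_by_source(items: List[Dict], max_total: int, per_source_limit: int = 3) -> List[Dict]:
--     if max_total <= 0:
--         return []
--     counts = {}
--     out: List[Dict] = []
--     for it in items:
--         if len(out) >= max_total:
--             break
--         src = (it.get("source") or "").lower()
--         used = counts.get(src, 0)
--         if used >= per_source_limit:
--             continue
--         out.append(it)
--         counts[src] = used + 1
--     return out
-- ===== SOURCE B (Python) =====
-- from typing import List, Dict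
--
-- def diversify_by_source(items: List[Dict], max_total: int, per_source_limit: int = 3) -> List[Dict]:
--     if max_total <= 0 or per_source_limit <= 0:
--         return []
--     groups = {}
--     for i, it in enumerate(items):
--         src = (it.get("source") or "").lower()
--         groups.setdefault(src, []).append(i)
--     chosen = {i for idxs in groups.values() for i in idxs[:per_source_limit]}
--     out = [it for i, it in enumerate(items) if i in chosen]
--     return out[:max_total]
-- ===== Notes on version B (the rewrite author's own statement) =====
-- stated objective: alternative
-- what changed: B replaces A's single stateful counting pass with an early break by a group-by strategy: it buckets item indices per normalized source in a dict, takes the first per_source_limit indices of each bucket to form a chosen index set, rebuilds the kept list by original position, and truncates with a final slice.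
import Mathlib
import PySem

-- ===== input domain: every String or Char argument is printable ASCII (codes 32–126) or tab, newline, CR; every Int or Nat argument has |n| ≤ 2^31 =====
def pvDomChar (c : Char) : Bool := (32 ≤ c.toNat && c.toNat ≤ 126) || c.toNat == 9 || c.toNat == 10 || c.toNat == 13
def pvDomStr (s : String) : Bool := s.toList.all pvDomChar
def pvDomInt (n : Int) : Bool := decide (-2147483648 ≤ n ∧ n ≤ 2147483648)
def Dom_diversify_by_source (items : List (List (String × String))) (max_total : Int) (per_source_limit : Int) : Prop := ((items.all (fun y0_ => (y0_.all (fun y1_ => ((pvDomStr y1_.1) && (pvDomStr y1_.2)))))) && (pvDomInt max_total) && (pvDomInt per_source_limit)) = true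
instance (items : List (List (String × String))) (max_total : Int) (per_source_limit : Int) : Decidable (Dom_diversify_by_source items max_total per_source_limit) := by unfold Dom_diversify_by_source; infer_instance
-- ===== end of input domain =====

-- B replaces A's counting pass with an early break by group-by-source index bucketing, a chosen index set, and a final slice; objective: alternative (same cost).


-- ===== PORT A =====
-- src = (it.get("source") or "").lower()  (assoc-list first-match lookup; Python `or` yields "" for a missing or empty value)
def pvSrc (it : List (String × String)) : String :=
  PySem.Str.lower (match it.lookup "source" with
    | none => ""
    | some s => if s == "" then "" else s)

-- A's loop: interleaves the global cap (break) with the per-source counting filter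
def pvLoopA (L maxT : Int) : List (List (String × String)) → PySem.Dict String Int → List (List (String × String)) → List (List (String × String))
  | [], _, out => out
  | it :: rest, counts, out =>
    if (out.length : Int) ≥ maxT then out
    else
      let src := pvSrc it
      let used := PySem.Dict.getD counts src 0
      if used ≥ L then pvLoopA L maxT rest counts out
      else pvLoopA L maxT rest (PySem.Dict.insert counts src (used + 1)) (out ++ [it])

def diversify_by_source (items : List (List (String × String))) (max_total : Int) (per_source_limit : Int) : List (List (String × String)) :=
  if max_total ≤ 0 then [] else pvLoopA per_source_limit max_total items PySem.Dict.empty []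

-- ===== PORT B =====
-- B: bucket indices per source (groups.setdefault(src, []).append(i) = modify with default []),
-- chosen = set comprehension over the truncated buckets, then rebuild by position and slice.
def diversify_by_source_alt (items : List (List (String × String))) (max_total : Int) (per_source_limit : Int) : List (List (String × String)) :=
  if max_total ≤ 0 ∨ per_source_limit ≤ 0 then [] else
    let enumItems := PySem.List.enumerate items 0
    let groups := enumItems.foldl (fun d p => PySem.Dict.modify d (pvSrc p.2) [] (fun v => v ++ [p.1])) PySem.Dict.empty
    let chosen : PySem.Set Int := PySem.Set.ofList ((PySem.Dict.values groups).flatMap (fun idxs => PySem.List.slice idxs none (some per_source_limit)))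
    let out := (enumItems.filter (fun p => PySem.Set.contains chosen p.1)).map (·.2)
    PySem.List.slice out none (some max_total)

-- ===== PRECONDITION & SPEC =====
def Spec_diversify_by_source (items : List (List (String × String))) (max_total : Int) (per_source_limit : Int) (out : List (List (String × String))) : Prop := out = diversify_by_source_alt items max_total per_source_limit
instance (items : List (List (String × String))) (max_total : Int) (per_source_limit : Int) (out : List (List (String × String))) : Decidable (Spec_diversify_by_source items max_total per_source_limit out) := by unfold Spec_diversify_by_source; infer_instance

-- ===== CLAIM (what is proved, stated in full; the proofs are below) =====
def Claim_equal_diversify_by_source : Prop := ∀ (items : List (List (String × String))) (max_total : Int) (per_source_limit : Int), Dom_diversify_by_source items max_total per_source_limit → Spec_diversify_by_source items max_total per_source_limit (diversify_by_source items max_total per_source_limit)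

-- ===== LEMMAS AND PROOFS =====
-- canonical middle form: keep an item iff its source occurred < L times among the earlier sources
def keepSpec (L : Int) : List String → List (List (String × String)) → List (List (String × String))
  | _, [] => []
  | pre, it :: rest =>
    if ((pre.count (pvSrc it) : Int)) < L then it :: keepSpec L (pre ++ [pvSrc it]) rest
    else keepSpec L (pre ++ [pvSrc it]) rest

theorem pvLoopA_nonpos (L maxT : Int) (hL : L ≤ 0) (xs : List (List (String × String)))
    (out : List (List (String × String))) :
    pvLoopA L maxT xs PySem.Dict.empty out = out := by
  induction xs generalizing out with
  | nil => rfl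
  | cons it rest ih =>
    by_cases hfull : (out.length : Int) ≥ maxT
    · simp [pvLoopA, hfull]
    · have h0 : PySem.Dict.getD (PySem.Dict.empty : PySem.Dict String Int) (pvSrc it) 0 ≥ L := by
        rw [PySem.Dict.getD_empty]; omega
      simp only [pvLoopA, if_neg hfull, ge_iff_le, if_pos h0]
      exact ih out

-- A's interleaved loop = append the (cap - |out|)-prefix of the canonical filter; counts holds min L (count in prefix)
theorem pvLoopA_eq_take (L maxT : Int) (xs : List (List (String × String)))
    (counts : PySem.Dict String Int) (out : List (List (String × String))) (pre : List String)
    (hinv : ∀ s, PySem.Dict.getD counts s 0 = min L ((pre.count s : Int))) :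
    pvLoopA L maxT xs counts out = out ++ (keepSpec L pre xs).take (maxT - out.length).toNat := by
  induction xs generalizing counts out pre with
  | nil => simp [pvLoopA, keepSpec]
  | cons it rest ih =>
    have hc := hinv (pvSrc it)
    by_cases hfull : (out.length : Int) ≥ maxT
    · have h0 : (maxT - out.length).toNat = 0 := by omega
      simp [pvLoopA, hfull, h0]
    · have hn : (maxT - out.length).toNat = (maxT - (out.length + 1)).toNat + 1 := by omega
      by_cases hused : PySem.Dict.getD counts (pvSrc it) 0 ≥ L
      · have hge : ¬ ((pre.count (pvSrc it) : Int) < L) := by omega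
        simp only [pvLoopA, if_neg hfull, ge_iff_le, if_pos hused, keepSpec, if_neg hge]
        apply ih
        intro s
        rcases eq_or_ne s (pvSrc it) with hs | hs
        · subst hs
          simp only [List.count_append, List.count_cons, List.count_nil, BEq.rfl]
          push_cast
          omega
        · simp only [List.count_append, List.count_cons, List.count_nil]
          rw [if_neg (by simpa using hs.symm)]
          simpa using hinv s
      · have hlt : (pre.count (pvSrc it) : Int) < L := by omega
        simp only [pvLoopA, if_neg hfull, ge_iff_le, if_neg hused, keepSpec, if_pos hlt]
        rw [ih _ (out ++ [it]) (pre ++ [pvSrc it]) ?_, hn]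
        · simp
        · intro s
          rw [PySem.Dict.getD_insert]
          rcases eq_or_ne s (pvSrc it) with hs | hs
          · subst hs
            rw [if_pos rfl]
            simp only [List.count_append, List.count_cons, List.count_nil, BEq.rfl]
            push_cast
            omega
          · rw [if_neg hs]
            simp only [List.count_append, List.count_cons, List.count_nil]
            rw [if_neg (by simpa using hs.symm)]
            simpa using hinv s

-- B-side: index bucket of source s, as a named abbreviation for the proofs
def gIdx (s : String) (items : List (List (String × String))) : List Int :=
  ((PySem.List.enumerate items 0).filter (fun p => pvSrc p.2 == s)).map (·.1)

theorem groups_getD (items : List (List (String × String))) (s : String) :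
    ((PySem.List.enumerate items 0).foldl
        (fun d p => PySem.Dict.modify d (pvSrc p.2) [] (fun v => v ++ [p.1])) PySem.Dict.empty).getD s []
      = gIdx s items := by
  have h : ((PySem.List.enumerate items 0).map (fun p => (pvSrc p.2, p.1))).foldl
        (fun d q => PySem.Dict.modify d q.1 [] (fun v => v ++ [q.2])) PySem.Dict.empty
      = (PySem.List.enumerate items 0).foldl
        (fun d p => PySem.Dict.modify d (pvSrc p.2) [] (fun v => v ++ [p.1])) PySem.Dict.empty := by
    rw [List.foldl_map]
  rw [← h, PySem.Dict.getD_foldl_modify_append]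
  simp [gIdx, List.filter_map, Function.comp_def]

theorem mem_gIdx (s : String) (items : List (List (String × String))) (i : Int) :
    i ∈ gIdx s items ↔ ∃ (k : Nat) (_ : k < items.length), i = (k : Int) ∧ pvSrc items[k] = s := by
  simp only [gIdx, List.mem_map, List.mem_filter, PySem.List.mem_enumerate_iff]
  constructor
  · rintro ⟨a, ⟨⟨k, hk, rfl⟩, hs⟩, rfl⟩
    exact ⟨k, hk, by simp, by simpa using hs⟩
  · rintro ⟨k, hk, rfl, hs⟩
    exact ⟨((k:Int), items[k]), ⟨⟨k, hk, by simp⟩, by simpa using hs⟩, rfl⟩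

theorem length_gIdx (s : String) (items : List (List (String × String))) :
    (gIdx s items).length = (items.map pvSrc).count s := by
  rw [gIdx, List.length_map, ← List.countP_eq_length_filter]
  conv_rhs => rw [← PySem.List.map_snd_enumerate items 0]
  rw [List.count_eq_countP, List.countP_map, List.countP_map]
  apply List.countP_congr
  intro p _
  simp [Function.comp]

theorem gIdx_append_singleton (s : String) (xs : List (List (String × String))) (x : List (String × String)) :
    gIdx s (xs ++ [x]) = gIdx s xs ++ (if pvSrc x == s then [(xs.length : Int)] else []) := by
  rw [gIdx, PySem.List.enumerate_append, List.filter_append, List.map_append]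
  congr 1
  by_cases h : pvSrc x == s
  · simp [PySem.List.enumerate_cons, PySem.List.enumerate_nil, h]
  · simp [PySem.List.enumerate_cons, PySem.List.enumerate_nil, h]

theorem mem_take_gIdx (s : String) (m : Nat) (items : List (List (String × String)))
    (k : Nat) (hk : k < items.length) :
    ((k : Int) ∈ (gIdx s items).take m) ↔
      (pvSrc items[k] = s ∧ ((items.take k).map pvSrc).count s < m) := by
  induction items using List.reverseRecOn with
  | nil => simp at hk
  | append_singleton xs x ih =>
    rw [gIdx_append_singleton, List.take_append]
    have hbound : ∀ i ∈ (gIdx s xs).take m, ∃ (j : Nat), j < xs.length ∧ i = (j : Int) := by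
      intro i hi
      obtain ⟨j, hj, rfl, -⟩ := (mem_gIdx s xs i).1 (List.take_subset _ _ hi)
      exact ⟨j, hj, rfl⟩
    by_cases hklt : k < xs.length
    · have h2 : ((k : Int) ∈ (if pvSrc x == s then [(xs.length : Int)] else []).take (m - (gIdx s xs).length)) → False := by
        intro hmem
        have := List.take_subset _ _ hmem
        by_cases hs : pvSrc x == s
        · simp [hs] at this; omega
        · simp [hs] at this
      rw [List.mem_append]
      rw [List.getElem_append_left hklt, List.take_append_of_le_length (le_of_lt hklt)]
      constructor
      · rintro (h | h)
        · exact (ih hklt).1 h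
        · exact absurd h h2
      · intro h
        exact Or.inl ((ih hklt).2 h)
    · have hkeq : k = xs.length := by
        simp only [List.length_append, List.length_singleton] at hk
        omega
      subst hkeq
      have h1 : (((xs.length : Nat) : Int) ∈ (gIdx s xs).take m) → False := by
        intro hmem
        obtain ⟨j, hj, hji⟩ := hbound _ hmem
        omega
      rw [List.mem_append, List.getElem_concat_length,
        List.take_append_of_le_length (le_refl _), List.take_length]
      rw [length_gIdx]
      constructor
      · rintro (h | h)
        · exact absurd h h1
        · by_cases hs : pvSrc x == s
          · rw [if_pos hs] at h
            have := List.take_subset _ _ h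
            have hle : 0 < m - (xs.map pvSrc).count s := by
              rcases Nat.eq_zero_or_pos (m - (xs.map pvSrc).count s) with h0 | h0
              · rw [h0] at h; simp at h
              · exact h0
            exact ⟨by simpa using hs, by omega⟩
          · rw [if_neg hs] at h; simp at h
      · rintro ⟨hsx, hcnt⟩
        right
        rw [if_pos (by simpa using hsx)]
        have : 0 < m - (xs.map pvSrc).count s := by omega
        rw [List.take_of_length_le (by simp; omega)]
        simp
      rfl


theorem mem_chosen (items : List (List (String × String))) (L : Int) (hL : 0 < L)
    (k : Nat) (hk : k < items.length) :
    ((k : Int) ∈ PySem.Set.ofList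
        ((PySem.Dict.values ((PySem.List.enumerate items 0).foldl
            (fun d p => PySem.Dict.modify d (pvSrc p.2) [] (fun v => v ++ [p.1])) PySem.Dict.empty)).flatMap
          (fun idxs => PySem.List.slice idxs none (some L)))) ↔
      (((items.take k).map pvSrc).count (pvSrc items[k]) : Int) < L := by
  set groups := (PySem.List.enumerate items 0).foldl
      (fun d p => PySem.Dict.modify d (pvSrc p.2) [] (fun v => v ++ [p.1])) PySem.Dict.empty with hg
  have hnd : groups.keys.Nodup := by
    rw [hg]
    exact PySem.Dict.nodup_keys_foldl_modify_key _ _ _ _ _ (by simp [PySem.Dict.keys_empty])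
  have hvals : PySem.Dict.values groups = groups.keys.map (fun s => groups.getD s []) :=
    PySem.Dict.values_eq_map_keys groups hnd []
  rw [PySem.Set.mem_ofList, List.mem_flatMap]
  constructor
  · rintro ⟨v, hv, hkv⟩
    rw [hvals, List.mem_map] at hv
    obtain ⟨s, hsk, rfl⟩ := hv
    rw [hg, groups_getD, PySem.List.slice_to _ (le_of_lt hL)] at hkv
    obtain ⟨hsx, hcnt⟩ := (mem_take_gIdx s L.toNat items k hk).1 hkv
    rw [hsx]
    omega
  · intro hcnt
    refine ⟨groups.getD (pvSrc items[k]) [], ?_, ?_⟩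
    · rw [hvals, List.mem_map]
      refine ⟨pvSrc items[k], ?_, rfl⟩
      have hkeys : groups.keys = PySem.Set.ofList ((PySem.List.enumerate items 0).map (fun p => pvSrc p.2)) := by
        rw [hg, PySem.Dict.keys_foldl_modify_key, PySem.Dict.keys_empty, PySem.Set.update_nil_left]
      rw [hkeys, PySem.Set.mem_ofList, List.mem_map]
      exact ⟨((k : Int), items[k]), by
        rw [PySem.List.mem_enumerate_iff]
        exact ⟨k, hk, by simp⟩, rfl⟩
    · rw [hg, groups_getD, PySem.List.slice_to _ (le_of_lt hL)]
      exact (mem_take_gIdx _ _ _ k hk).2 ⟨rfl, by omega⟩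

theorem filt_eq (L : Int) (chosen : PySem.Set Int) (items : List (List (String × String)))
    (hch : ∀ (k : Nat) (hk : k < items.length),
      ((k : Int) ∈ chosen ↔ (((items.take k).map pvSrc).count (pvSrc (items[k]'hk)) : Int) < L)) :
    ∀ (xs : List (List (String × String))) (k : Nat), items.drop k = xs →
      (((PySem.List.enumerate xs (k : Int)).filter (fun p => PySem.Set.contains chosen p.1)).map (·.2))
        = keepSpec L ((items.take k).map pvSrc) xs := by
  intro xs
  induction xs with
  | nil => intro k _; simp [PySem.List.enumerate_nil, keepSpec]
  | cons x rest ih =>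
    intro k hdrop
    have hklt : k < items.length := by
      by_contra h
      rw [List.drop_eq_nil_of_le (by omega)] at hdrop
      exact List.cons_ne_nil x rest hdrop.symm
    have hcons := List.drop_eq_getElem_cons hklt
    rw [hdrop] at hcons
    injection hcons with hxk hrest
    have htake : (items.take (k+1)).map pvSrc = (items.take k).map pvSrc ++ [pvSrc x] := by
      have hlen : k < (items.map pvSrc).length := by simpa using hklt
      rw [List.map_take, List.map_take, List.take_add_one, List.getElem?_eq_getElem hlen]
      simp [hxk]
    have hcast : ((k : Int) + 1) = (((k + 1 : Nat)) : Int) := by push_cast; ring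
    rw [PySem.List.enumerate_cons, List.filter_cons]
    by_cases hmem : ((k : Int)) ∈ chosen
    · have hb : PySem.Set.contains chosen ((k : Int)) = true := by
        simp [PySem.Set.contains_eq_listContains, hmem]
      have hcond : (((items.take k).map pvSrc).count (pvSrc x) : Int) < L := by
        have := (hch k hklt).1 hmem
        rwa [← hxk] at this
      rw [keepSpec, if_pos hcond]
      simp only [hb, if_true, List.map_cons]
      rw [hcast, ih (k+1) hrest.symm, htake]
    · have hb : PySem.Set.contains chosen ((k : Int)) = false := by
        simp [PySem.Set.contains_eq_listContains, hmem]
      have hcond : ¬ ((((items.take k).map pvSrc).count (pvSrc x) : Int) < L) := by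
        intro hc
        exact hmem ((hch k hklt).2 (by rwa [hxk] at hc))
      rw [keepSpec, if_neg hcond]
      simp only [hb, Bool.false_eq_true, if_false]
      rw [hcast, ih (k+1) hrest.symm, htake]

-- ===== VERDICT (by name: the statement is the Claim_ definition above) =====
theorem diversify_by_source_spec : Claim_equal_diversify_by_source := by
  intro items maxT L _
  unfold Spec_diversify_by_source diversify_by_source diversify_by_source_alt
  by_cases hmt : maxT ≤ 0
  · rw [if_pos hmt, if_pos (Or.inl hmt)]
  · by_cases hL : L ≤ 0
    · rw [if_neg hmt, if_pos (Or.inr hL), pvLoopA_nonpos L maxT hL]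
    · rw [if_neg hmt, if_neg (by omega : ¬ (maxT ≤ 0 ∨ L ≤ 0))]
      rw [pvLoopA_eq_take L maxT items PySem.Dict.empty [] []
        (by intro s; rw [PySem.Dict.getD_empty]; simp; omega)]
      have hfe := filt_eq L _ items (fun k hk => mem_chosen items L (by omega) k hk) items 0 rfl
      simp only [Nat.cast_zero, List.take_zero, List.map_nil] at hfe
      simp only [List.nil_append, List.length_nil, Nat.cast_zero, Int.sub_zero]
      rw [hfe, PySem.List.slice_to _ (by omega : (0:Int) ≤ maxT)]
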